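-- pv_equiv track=rewrite | github.com/sejaldua/synergy-scouting-app | sequence_dump.py | tally_stats
-- ===== SOURCE A (Python) =====
-- def parse_play(play_list, tallies):
--     seq = play_list.split(' > ')
--     seq = [info.strip() for info in seq]
--     for event in seq:
--         if event == 'Miss 2 Pts' or event == 'Miss 3 Pts':
--             tallies['attempts'] += 1
--         if event == 'Miss 3 Pts':
--             tallies['3PT attempts'] += 1
--         if event == 'Make 2 Pts' or event == 'Make 3 Pts':
--             tallies['makes'] += 1
--             tallies['attempts'] += 1
--             if event == 'Make 2 Pts':
--                 tallies['points'] += 2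
--             elif event == 'Make 3 Pts':
--                 tallies['points'] += 3
--                 tallies['3PT makes'] += 1
--                 tallies['3PT attempts'] += 1
--         if event == 'Guarded':
--             tallies['guarded'] += 1
--         if event == 'Open':
--             tallies['open'] += 1
--         if event == 'Turnover':
--             tallies['turnovers'] += 1
--         if event == 'Free Throw':
--             tallies['FT attempts'] += 1
--         if event == 'Made':
--             tallies['points'] += 1
--             tallies['FT makes'] += 1
--     tallies['possessions'] += 1
--     return tallies
--
-- def tally_stats(plays):
--     tallies = {'attempts': 0, 'makes': 0, 'guarded': 0, 'open': 0, '3PT attempts': 0, '3PT makes': 0, 'turnovers': 0, 'possessions': 0, 'FT attempts': 0, 'FT makes': 0, 'points': 0}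
--     for play in plays:
--         if isinstance(play, list):
--             for poss in play:
--                 tallies = parse_play(poss, tallies)
--         else:
--             tallies = parse_play(play, tallies)
--     return tallies
-- ===== SOURCE B (Python) =====
-- def tally_stats(plays):
--     # Stage 1: flatten to event frequencies + possession count.
--     possessions = 0
--     counts = {}
--     for play in plays:
--         for poss in (play if isinstance(play, list) else [play]):
--             possessions += 1
--             for e in poss.split(' > '):
--                 e = e.strip()
--                 counts[e] = counts.get(e, 0) + 1
--     # Stage 2: each stat is a closed-form linear combination of the counts.
--     x2 = counts.get('Miss 2 Pts', 0)
--     x3 = counts.get('Miss 3 Pts', 0)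
--     m2 = counts.get('Make 2 Pts', 0)
--     m3 = counts.get('Make 3 Pts', 0)
--     ftm = counts.get('Made', 0)
--     return {
--         'attempts': x2 + x3 + m2 + m3,
--         'makes': m2 + m3,
--         'guarded': counts.get('Guarded', 0),
--         'open': counts.get('Open', 0),
--         '3PT attempts': x3 + m3,
--         '3PT makes': m3,
--         'turnovers': counts.get('Turnover', 0),
--         'possessions': possessions,
--         'FT attempts': counts.get('Free Throw', 0),
--         'FT makes': ftm,
--         'points': 2 * m2 + 3 * m3 + ftm,
--     }
-- ===== Notes on version B (the rewrite author's own statement) =====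
-- stated objective: alternative
-- what changed: Instead of A's per-event if-cascade mutating eleven running tallies, B first builds a frequency counter of stripped event tokens (plus a possession count) and then computes every stat once as a closed-form linear combination of those counts.
import Mathlib
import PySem

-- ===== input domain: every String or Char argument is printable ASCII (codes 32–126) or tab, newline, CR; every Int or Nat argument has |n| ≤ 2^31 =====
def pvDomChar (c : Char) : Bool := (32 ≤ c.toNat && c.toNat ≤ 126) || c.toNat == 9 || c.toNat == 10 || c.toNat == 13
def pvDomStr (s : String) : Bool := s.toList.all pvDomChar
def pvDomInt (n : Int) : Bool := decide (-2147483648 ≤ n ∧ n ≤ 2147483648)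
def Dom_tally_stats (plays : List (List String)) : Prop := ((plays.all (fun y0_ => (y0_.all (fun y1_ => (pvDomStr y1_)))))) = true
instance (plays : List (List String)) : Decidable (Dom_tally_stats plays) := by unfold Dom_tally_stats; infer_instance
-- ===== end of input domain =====

-- B replaces A's per-event if-cascade over eleven running tallies by a two-stage
-- computation: count event frequencies first, then derive each stat as a closed-form
-- linear combination of the counts (alternative decomposition; same cost).
-- Return value only: A mutates and returns a dict it builds locally, so no
-- caller-visible mutation differs.

-- ===== PORT A =====
-- one iteration of parse_play's `for event in seq` body
def pvStepA (t : PySem.Dict String Int) (event : String) : PySem.Dict String Int :=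
  let t := if event == "Miss 2 Pts" || event == "Miss 3 Pts" then t.modify "attempts" 0 (· + 1) else t
  let t := if event == "Miss 3 Pts" then t.modify "3PT attempts" 0 (· + 1) else t
  let t :=
    if event == "Make 2 Pts" || event == "Make 3 Pts" then
      let t := t.modify "makes" 0 (· + 1)
      let t := t.modify "attempts" 0 (· + 1)
      if event == "Make 2 Pts" then t.modify "points" 0 (· + 2)
      else if event == "Make 3 Pts" then
        ((t.modify "points" 0 (· + 3)).modify "3PT makes" 0 (· + 1)).modify "3PT attempts" 0 (· + 1)
      else t
    else t
  let t := if event == "Guarded" then t.modify "guarded" 0 (· + 1) else t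
  let t := if event == "Open" then t.modify "open" 0 (· + 1) else t
  let t := if event == "Turnover" then t.modify "turnovers" 0 (· + 1) else t
  let t := if event == "Free Throw" then t.modify "FT attempts" 0 (· + 1) else t
  if event == "Made" then (t.modify "points" 0 (· + 1)).modify "FT makes" 0 (· + 1) else t

def pvParsePlay (play_list : String) (tallies : PySem.Dict String Int) : PySem.Dict String Int :=
  -- `' > '` is nonempty, so Python's split never raises and split? is always `some`
  let seq := (PySem.Str.split? play_list " > ").getD []
  let seq := seq.map PySem.Str.strip
  let tallies := seq.foldl pvStepA tallies
  tallies.modify "possessions" 0 (· + 1)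

def pvInit : PySem.Dict String Int :=
  PySem.Dict.ofList [("attempts", 0), ("makes", 0), ("guarded", 0), ("open", 0),
    ("3PT attempts", 0), ("3PT makes", 0), ("turnovers", 0), ("possessions", 0),
    ("FT attempts", 0), ("FT makes", 0), ("points", 0)]

-- under the type convention every `play` is a list, so `isinstance(play, list)` is True
def tally_stats (plays : List (List String)) : List (String × Int) :=
  (plays.foldl (fun tallies play => play.foldl (fun t poss => pvParsePlay poss t) tallies) pvInit).items

-- ===== PORT B =====
-- one possession of stage 1: bump the possession count, count each stripped event
def pvPossStep (st : Int × PySem.Dict String Int) (poss : String) : Int × PySem.Dict String Int :=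
  (st.1 + 1,
   ((PySem.Str.split? poss " > ").getD []).foldl
     (fun c e => let e := PySem.Str.strip e; c.insert e (c.getD e 0 + 1)) st.2)

def tally_stats_alt (plays : List (List String)) : List (String × Int) :=
  let st := plays.foldl (fun st play => play.foldl pvPossStep st)
              ((0 : Int), (PySem.Dict.empty : PySem.Dict String Int))
  let c := st.2
  let x2 := c.getD "Miss 2 Pts" 0
  let x3 := c.getD "Miss 3 Pts" 0
  let m2 := c.getD "Make 2 Pts" 0
  let m3 := c.getD "Make 3 Pts" 0
  let ftm := c.getD "Made" 0
  [("attempts", x2 + x3 + m2 + m3),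
   ("makes", m2 + m3),
   ("guarded", c.getD "Guarded" 0),
   ("open", c.getD "Open" 0),
   ("3PT attempts", x3 + m3),
   ("3PT makes", m3),
   ("turnovers", c.getD "Turnover" 0),
   ("possessions", st.1),
   ("FT attempts", c.getD "Free Throw" 0),
   ("FT makes", ftm),
   ("points", 2 * m2 + 3 * m3 + ftm)]

-- ===== PRECONDITION & SPEC =====
def Spec_tally_stats (plays : List (List String)) (out : List (String × Int)) : Prop := out = tally_stats_alt plays
instance (plays : List (List String)) (out : List (String × Int)) : Decidable (Spec_tally_stats plays out) := by unfold Spec_tally_stats; infer_instance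

-- ===== CLAIM (what is proved, stated in full; the proofs are below) =====
def Claim_equal_tally_stats : Prop := ∀ (plays : List (List String)), Dom_tally_stats plays → Spec_tally_stats plays (tally_stats plays)

-- ===== LEMMAS AND PROOFS =====

-- A's tallies dict, expressed as a function of B's event counter and possession count
def pvMkT (c : PySem.Dict String Int) (p : Int) : PySem.Dict String Int :=
  PySem.Dict.mk
    [("attempts", c.getD "Miss 2 Pts" 0 + c.getD "Miss 3 Pts" 0 + c.getD "Make 2 Pts" 0 + c.getD "Make 3 Pts" 0),
     ("makes", c.getD "Make 2 Pts" 0 + c.getD "Make 3 Pts" 0),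
     ("guarded", c.getD "Guarded" 0),
     ("open", c.getD "Open" 0),
     ("3PT attempts", c.getD "Miss 3 Pts" 0 + c.getD "Make 3 Pts" 0),
     ("3PT makes", c.getD "Make 3 Pts" 0),
     ("turnovers", c.getD "Turnover" 0),
     ("possessions", p),
     ("FT attempts", c.getD "Free Throw" 0),
     ("FT makes", c.getD "Made" 0),
     ("points", 2 * c.getD "Make 2 Pts" 0 + 3 * c.getD "Make 3 Pts" 0 + c.getD "Made" 0)]

-- A's per-event cascade is counting one more occurrence of the event
theorem pvStepA_mkT (c : PySem.Dict String Int) (p : Int) (s : String) :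
    pvStepA (pvMkT c p) s = pvMkT (c.insert s (c.getD s 0 + 1)) p := by
  by_cases h1 : s = "Miss 2 Pts"
  · subst h1
    simp only [pvMkT, PySem.Dict.getD_insert]
    norm_num
    generalize c.getD "Miss 2 Pts" 0 = x2
    generalize c.getD "Miss 3 Pts" 0 = x3
    generalize c.getD "Make 2 Pts" 0 = m2
    generalize c.getD "Make 3 Pts" 0 = m3
    generalize c.getD "Guarded" 0 = g
    generalize c.getD "Open" 0 = o
    generalize c.getD "Turnover" 0 = tov
    generalize c.getD "Free Throw" 0 = fta
    generalize c.getD "Made" 0 = ftm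
    simp [pvStepA, PySem.Dict.modify, PySem.Dict.get?, PySem.Dict.insert, PySem.Dict.contains, PySem.Dict.getD]
    omega
  by_cases h2 : s = "Miss 3 Pts"
  · subst h2
    simp only [pvMkT, PySem.Dict.getD_insert]
    norm_num
    generalize c.getD "Miss 2 Pts" 0 = x2
    generalize c.getD "Miss 3 Pts" 0 = x3
    generalize c.getD "Make 2 Pts" 0 = m2
    generalize c.getD "Make 3 Pts" 0 = m3
    generalize c.getD "Guarded" 0 = g
    generalize c.getD "Open" 0 = o
    generalize c.getD "Turnover" 0 = tov
    generalize c.getD "Free Throw" 0 = fta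
    generalize c.getD "Made" 0 = ftm
    simp [pvStepA, PySem.Dict.modify, PySem.Dict.get?, PySem.Dict.insert, PySem.Dict.contains, PySem.Dict.getD]
    omega
  by_cases h3 : s = "Make 2 Pts"
  · subst h3
    simp only [pvMkT, PySem.Dict.getD_insert]
    norm_num
    generalize c.getD "Miss 2 Pts" 0 = x2
    generalize c.getD "Miss 3 Pts" 0 = x3
    generalize c.getD "Make 2 Pts" 0 = m2
    generalize c.getD "Make 3 Pts" 0 = m3
    generalize c.getD "Guarded" 0 = g
    generalize c.getD "Open" 0 = o
    generalize c.getD "Turnover" 0 = tov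
    generalize c.getD "Free Throw" 0 = fta
    generalize c.getD "Made" 0 = ftm
    simp [pvStepA, PySem.Dict.modify, PySem.Dict.get?, PySem.Dict.insert, PySem.Dict.contains, PySem.Dict.getD]
    omega
  by_cases h4 : s = "Make 3 Pts"
  · subst h4
    simp only [pvMkT, PySem.Dict.getD_insert]
    norm_num
    generalize c.getD "Miss 2 Pts" 0 = x2
    generalize c.getD "Miss 3 Pts" 0 = x3
    generalize c.getD "Make 2 Pts" 0 = m2
    generalize c.getD "Make 3 Pts" 0 = m3
    generalize c.getD "Guarded" 0 = g
    generalize c.getD "Open" 0 = o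
    generalize c.getD "Turnover" 0 = tov
    generalize c.getD "Free Throw" 0 = fta
    generalize c.getD "Made" 0 = ftm
    simp [pvStepA, PySem.Dict.modify, PySem.Dict.get?, PySem.Dict.insert, PySem.Dict.contains, PySem.Dict.getD]
    omega
  by_cases h5 : s = "Guarded"
  · subst h5
    simp only [pvMkT, PySem.Dict.getD_insert]
    norm_num
    generalize c.getD "Miss 2 Pts" 0 = x2
    generalize c.getD "Miss 3 Pts" 0 = x3
    generalize c.getD "Make 2 Pts" 0 = m2
    generalize c.getD "Make 3 Pts" 0 = m3
    generalize c.getD "Guarded" 0 = g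
    generalize c.getD "Open" 0 = o
    generalize c.getD "Turnover" 0 = tov
    generalize c.getD "Free Throw" 0 = fta
    generalize c.getD "Made" 0 = ftm
    simp [pvStepA, PySem.Dict.modify, PySem.Dict.get?, PySem.Dict.insert, PySem.Dict.contains, PySem.Dict.getD]
  by_cases h6 : s = "Open"
  · subst h6
    simp only [pvMkT, PySem.Dict.getD_insert]
    norm_num
    generalize c.getD "Miss 2 Pts" 0 = x2
    generalize c.getD "Miss 3 Pts" 0 = x3
    generalize c.getD "Make 2 Pts" 0 = m2
    generalize c.getD "Make 3 Pts" 0 = m3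
    generalize c.getD "Guarded" 0 = g
    generalize c.getD "Open" 0 = o
    generalize c.getD "Turnover" 0 = tov
    generalize c.getD "Free Throw" 0 = fta
    generalize c.getD "Made" 0 = ftm
    simp [pvStepA, PySem.Dict.modify, PySem.Dict.get?, PySem.Dict.insert, PySem.Dict.contains, PySem.Dict.getD]
  by_cases h7 : s = "Turnover"
  · subst h7
    simp only [pvMkT, PySem.Dict.getD_insert]
    norm_num
    generalize c.getD "Miss 2 Pts" 0 = x2
    generalize c.getD "Miss 3 Pts" 0 = x3
    generalize c.getD "Make 2 Pts" 0 = m2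
    generalize c.getD "Make 3 Pts" 0 = m3
    generalize c.getD "Guarded" 0 = g
    generalize c.getD "Open" 0 = o
    generalize c.getD "Turnover" 0 = tov
    generalize c.getD "Free Throw" 0 = fta
    generalize c.getD "Made" 0 = ftm
    simp [pvStepA, PySem.Dict.modify, PySem.Dict.get?, PySem.Dict.insert, PySem.Dict.contains, PySem.Dict.getD]
  by_cases h8 : s = "Free Throw"
  · subst h8
    simp only [pvMkT, PySem.Dict.getD_insert]
    norm_num
    generalize c.getD "Miss 2 Pts" 0 = x2
    generalize c.getD "Miss 3 Pts" 0 = x3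
    generalize c.getD "Make 2 Pts" 0 = m2
    generalize c.getD "Make 3 Pts" 0 = m3
    generalize c.getD "Guarded" 0 = g
    generalize c.getD "Open" 0 = o
    generalize c.getD "Turnover" 0 = tov
    generalize c.getD "Free Throw" 0 = fta
    generalize c.getD "Made" 0 = ftm
    simp [pvStepA, PySem.Dict.modify, PySem.Dict.get?, PySem.Dict.insert, PySem.Dict.contains, PySem.Dict.getD]
  by_cases h9 : s = "Made"
  · subst h9
    simp only [pvMkT, PySem.Dict.getD_insert]
    norm_num
    generalize c.getD "Miss 2 Pts" 0 = x2
    generalize c.getD "Miss 3 Pts" 0 = x3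
    generalize c.getD "Make 2 Pts" 0 = m2
    generalize c.getD "Make 3 Pts" 0 = m3
    generalize c.getD "Guarded" 0 = g
    generalize c.getD "Open" 0 = o
    generalize c.getD "Turnover" 0 = tov
    generalize c.getD "Free Throw" 0 = fta
    generalize c.getD "Made" 0 = ftm
    simp [pvStepA, PySem.Dict.modify, PySem.Dict.get?, PySem.Dict.insert, PySem.Dict.contains, PySem.Dict.getD]
    omega
  · simp [pvStepA, pvMkT, PySem.Dict.getD_insert,
      beq_eq_false_iff_ne.mpr h1, beq_eq_false_iff_ne.mpr h2, beq_eq_false_iff_ne.mpr h3,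
      beq_eq_false_iff_ne.mpr h4, beq_eq_false_iff_ne.mpr h5, beq_eq_false_iff_ne.mpr h6,
      beq_eq_false_iff_ne.mpr h7, beq_eq_false_iff_ne.mpr h8, beq_eq_false_iff_ne.mpr h9,
      Ne.symm h1, Ne.symm h2, Ne.symm h3, Ne.symm h4, Ne.symm h5, Ne.symm h6,
      Ne.symm h7, Ne.symm h8, Ne.symm h9]

theorem pvParsePlay_mkT (poss : String) (c : PySem.Dict String Int) (p : Int) :
    pvParsePlay poss (pvMkT c p) = pvMkT (pvPossStep (p, c) poss).2 (pvPossStep (p, c) poss).1 := by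
  simp only [pvParsePlay, pvPossStep, List.foldl_map]
  generalize (PySem.Str.split? poss " > ").getD [] = l
  induction l generalizing c with
  | nil => simp [pvMkT, PySem.Dict.modify, PySem.Dict.get?, PySem.Dict.insert, PySem.Dict.contains, PySem.Dict.getD]
  | cons e rest ih =>
    simp only [List.foldl_cons, pvStepA_mkT]
    exact ih _

theorem pv_play_mkT (play : List String) (c : PySem.Dict String Int) (p : Int) :
    play.foldl (fun t poss => pvParsePlay poss t) (pvMkT c p)
      = pvMkT (play.foldl pvPossStep (p, c)).2 (play.foldl pvPossStep (p, c)).1 := by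
  induction play generalizing c p with
  | nil => rfl
  | cons poss rest ih =>
    simp only [List.foldl_cons, pvParsePlay_mkT]
    exact ih _ _

theorem pv_plays_mkT (plays : List (List String)) (c : PySem.Dict String Int) (p : Int) :
    plays.foldl (fun tallies play => play.foldl (fun t poss => pvParsePlay poss t) tallies) (pvMkT c p)
      = pvMkT (plays.foldl (fun st play => play.foldl pvPossStep st) (p, c)).2
              (plays.foldl (fun st play => play.foldl pvPossStep st) (p, c)).1 := by
  induction plays generalizing c p with
  | nil => rfl
  | cons play rest ih =>
    simp only [List.foldl_cons, pv_play_mkT]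
    exact ih _ _

-- ===== VERDICT (by name: the statement is the Claim_ definition above) =====
theorem tally_stats_spec : Claim_equal_tally_stats := by
  intro plays _
  show tally_stats plays = tally_stats_alt plays
  have hinit : pvInit = pvMkT PySem.Dict.empty 0 := by decide
  simp only [tally_stats, hinit, pv_plays_mkT]
  rfl
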